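-- pv_equiv track=rewrite | github.com/Jayanashah/Transfer-Learning | src/data/utils.py | moveaxis
-- ===== SOURCE A (Python) =====
-- def moveaxis(ridge_list_raw):
--     """bring ridge data into shape (n_subjects, n_trials, n_windows)
--     Args:
--         ridge_list_raw (list): in order of (n_windows, n_subjects, n_trials)
--
--     Returns:
--         list: in order of (n_subjects, n_trials, n_windows)
--     """
--
--     n_windows = len(ridge_list_raw)
--     n_subjects = len(ridge_list_raw[0])
--     n_trials = len(ridge_list_raw[0][0])
--
--     ridge_attended_reordered = []
--     for subj in range(n_subjects):
--         subj_list = []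
--         for trial in range(n_trials):
--             trial_list = []
--             for win in range(n_windows):
--                 trial_list.append(ridge_list_raw[win][subj][trial])
--             subj_list.append(trial_list)
--         ridge_attended_reordered.append(subj_list)
--     return ridge_attended_reordered
-- ===== SOURCE B (Python) =====
-- def moveaxis(ridge_list_raw):
--     """bring ridge data into shape (n_subjects, n_trials, n_windows).
--
--     Loops only over subjects: for each subject, gather its windows x trials
--     matrix (rows trimmed to the declared trial count) and transpose it with zip.
--     """
--     n_windows = len(ridge_list_raw)
--     n_subjects = len(ridge_list_raw[0])
--     n_trials = len(ridge_list_raw[0][0])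
--
--     ridge_attended_reordered = []
--     for subj in range(n_subjects):
--         mat = [ridge_list_raw[win][subj][:n_trials] for win in range(n_windows)]
--         ridge_attended_reordered.append([list(col) for col in zip(*mat)])
--     return ridge_attended_reordered
-- ===== Notes on version B (the rewrite author's own statement) =====
-- stated objective: simpler
-- what changed: Replaced the two inner index loops (over trials then windows) by gathering each subject's windows-by-trials matrix and transposing it with zip, so only the subject loop remains explicit; the per-element work moves into C-level zip/slice.
-- outside the precondition, e.g. on moveaxis([[[]], []]): A returns [[]], B raises IndexError
import Mathlib
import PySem

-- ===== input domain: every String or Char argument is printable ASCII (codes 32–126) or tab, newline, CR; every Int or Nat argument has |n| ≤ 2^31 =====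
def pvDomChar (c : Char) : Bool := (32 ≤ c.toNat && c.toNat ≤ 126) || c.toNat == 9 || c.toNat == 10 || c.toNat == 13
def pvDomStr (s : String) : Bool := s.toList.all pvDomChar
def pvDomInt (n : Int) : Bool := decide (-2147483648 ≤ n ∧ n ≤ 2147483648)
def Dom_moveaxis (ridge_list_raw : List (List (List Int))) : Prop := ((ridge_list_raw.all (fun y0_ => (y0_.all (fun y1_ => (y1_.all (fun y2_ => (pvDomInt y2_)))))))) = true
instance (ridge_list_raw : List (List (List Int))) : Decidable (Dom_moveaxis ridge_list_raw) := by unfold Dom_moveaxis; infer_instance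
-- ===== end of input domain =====

-- B replaces A's two inner index loops by a per-subject matrix gather plus a zip-based
-- transpose (objective: simpler); A = B on every rectangular-enough input (Pre_) on which A returns.


-- ===== PORT A =====
-- Literal port of A: three nested index loops (subjects, trials, windows), each an
-- append-fold over range(...); out-of-range indexing (a Python IndexError, excluded
-- by Pre_) is defaulted via pyGetD.
def moveaxis (ridge_list_raw : List (List (List Int))) : List (List (List Int)) :=
  let n_windows : Int := ridge_list_raw.length
  let n_subjects : Int := (PySem.List.pyGetD ridge_list_raw 0 []).length
  let n_trials : Int := (PySem.List.pyGetD (PySem.List.pyGetD ridge_list_raw 0 []) 0 []).length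
  (PySem.List.pyRange 0 n_subjects).foldl (fun acc subj =>
    acc ++ [(PySem.List.pyRange 0 n_trials).foldl (fun sacc trial =>
      sacc ++ [(PySem.List.pyRange 0 n_windows).foldl (fun tacc win =>
        tacc ++ [PySem.List.pyGetD (PySem.List.pyGetD (PySem.List.pyGetD ridge_list_raw win []) subj []) trial 0]) []]) []]) []

-- ===== PORT B =====
-- zip(*rows): columns until the shortest row is exhausted.
def pyZipStar (rows : List (List Int)) : List (List Int) :=
  if h : rows = [] ∨ rows.any (·.isEmpty) then []
  else (rows.map (fun r => r.headD 0)) :: pyZipStar (rows.map List.tail)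
termination_by (rows.headD []).length
decreasing_by
  cases rows with
  | nil => exact absurd (Or.inl rfl) h
  | cons r rs =>
    have hr : r ≠ [] := by
      intro he; exact h (Or.inr (by simp [he]))
    simp only [List.headD_cons]
    cases r with
    | nil => exact absurd rfl hr
    | cons a l => simp

-- Literal port of B: one fold over subjects; per subject the windows×trials matrix
-- (rows sliced to n_trials) is gathered and transposed by pyZipStar.
def moveaxis_alt (ridge_list_raw : List (List (List Int))) : List (List (List Int)) :=
  let n_windows : Int := ridge_list_raw.length
  let n_subjects : Int := (PySem.List.pyGetD ridge_list_raw 0 []).length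
  let n_trials : Int := (PySem.List.pyGetD (PySem.List.pyGetD ridge_list_raw 0 []) 0 []).length
  (PySem.List.pyRange 0 n_subjects).foldl (fun acc subj =>
    let mat := (PySem.List.pyRange 0 n_windows).map (fun win =>
      PySem.List.slice (PySem.List.pyGetD (PySem.List.pyGetD ridge_list_raw win []) subj []) none (some n_trials))
    acc ++ [pyZipStar mat]) []

-- ===== PRECONDITION & SPEC =====
-- Pre_ excludes the inputs where A raises IndexError (empty outer/first lists, windows with
-- fewer subjects than window 0, rows shorter than the declared trial count), plus the ragged
-- corner where a window lacks a subject row but the declared trial count is 0: there A never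
-- touches that window and returns empty blocks while B's matrix gather raises IndexError.
def Pre_moveaxis (ridge_list_raw : List (List (List Int))) : Prop :=
  ridge_list_raw ≠ [] ∧ ridge_list_raw.headD [] ≠ [] ∧
  ∀ w ∈ ridge_list_raw, (ridge_list_raw.headD []).length ≤ w.length ∧
    ∀ r ∈ w.take (ridge_list_raw.headD []).length,
      ((ridge_list_raw.headD []).headD []).length ≤ r.length
instance (ridge_list_raw : List (List (List Int))) : Decidable (Pre_moveaxis ridge_list_raw) := by
  unfold Pre_moveaxis; infer_instance

def pvWitness_moveaxis : List (List (List Int)) := [[[1, 2], [3, 4]], [[5, 6], [7, 8]]]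

def Spec_moveaxis (ridge_list_raw : List (List (List Int))) (out : List (List (List Int))) : Prop := out = moveaxis_alt ridge_list_raw
instance (ridge_list_raw : List (List (List Int))) (out : List (List (List Int))) : Decidable (Spec_moveaxis ridge_list_raw out) := by unfold Spec_moveaxis; infer_instance

-- ===== CLAIM (what is proved, stated in full; the proofs are below) =====
def Claim_equal_moveaxis : Prop := ∀ (ridge_list_raw : List (List (List Int))), Dom_moveaxis ridge_list_raw → Pre_moveaxis ridge_list_raw → Spec_moveaxis ridge_list_raw (moveaxis ridge_list_raw)

-- ===== LEMMAS AND PROOFS =====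

-- Characterisation of pyZipStar on a nonempty rectangular matrix (all rows of length k),
-- plus bridges from the pyRange/pyGetD folds to List.range maps.
lemma pyZipStar_rect (k : Nat) :
    ∀ (rows : List (List Int)), rows ≠ [] → (∀ r ∈ rows, r.length = k) →
      pyZipStar rows = (List.range k).map (fun t => rows.map (fun r => r.getD t 0)) := by
  induction k with
  | zero =>
    intro rows hne hlen
    rw [pyZipStar]
    have : rows.any (·.isEmpty) = true := by
      cases rows with
      | nil => exact absurd rfl hne
      | cons r rs =>
        have := hlen r (by simp)
        simp [List.any_cons, List.eq_nil_of_length_eq_zero this]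
    simp [this]
  | succ k ih =>
    intro rows hne hlen
    rw [pyZipStar]
    have hany : rows.any (·.isEmpty) = false := by
      rw [List.any_eq_false]
      intro r hr
      have := hlen r hr
      simp [List.isEmpty_iff]
      intro he; rw [he] at this; simp at this
    rw [dif_neg (by simp [hne, hany])]
    have htl : ∀ r ∈ rows.map List.tail, r.length = k := by
      intro r hr
      obtain ⟨r0, hr0, rfl⟩ := List.mem_map.mp hr
      have := hlen r0 hr0
      simp [List.length_tail, this]
    rw [ih (rows.map List.tail) (by simpa using hne) htl]
    rw [List.range_succ_eq_map]
    simp only [List.map_cons, List.map_map]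
    congr 1
    · apply List.map_congr_left
      intro r hr
      have hl := hlen r hr
      cases r with
      | nil => simp at hl
      | cons a l => simp
    · apply List.map_congr_left
      intro t _
      simp only [Function.comp]
      apply List.map_congr_left
      intro r _
      cases r <;> simp

lemma fold_range_int {β : Type} (n : Nat) (f : Int → β) (acc : List β) :
    (PySem.List.pyRange 0 (n:Int)).foldl (fun a x => a ++ [f x]) acc = acc ++ (List.range n).map (fun (k : Nat) => f (k:Int)) := by
  rw [PySem.List.pyRange_zero_natCast, List.foldl_map, PySem.List.foldl_append_singleton_eq_map]

lemma moveaxis_eq (raw : List (List (List Int))) :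
    moveaxis raw = (List.range (PySem.List.pyGetD raw 0 []).length).map (fun s =>
      (List.range (PySem.List.pyGetD (PySem.List.pyGetD raw 0 []) 0 []).length).map (fun t =>
        (List.range raw.length).map (fun w =>
          ((raw.getD w []).getD s []).getD t 0))) := by
  unfold moveaxis
  simp only [fold_range_int, List.nil_append, PySem.List.pyGetD_natCast]

lemma map_range_pyRange {β : Type} (n : Nat) (f : Int → β) :
    (PySem.List.pyRange 0 (n:Int)).map f = (List.range n).map (fun (k : Nat) => f (k:Int)) := by
  rw [PySem.List.pyRange_zero_natCast, List.map_map]; rfl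

lemma moveaxis_alt_eq (raw : List (List (List Int))) :
    moveaxis_alt raw = (List.range (PySem.List.pyGetD raw 0 []).length).map (fun s =>
      pyZipStar ((List.range raw.length).map (fun w =>
        ((raw.getD w []).getD s []).take (PySem.List.pyGetD (PySem.List.pyGetD raw 0 []) 0 []).length))) := by
  unfold moveaxis_alt
  simp only [map_range_pyRange, fold_range_int, List.nil_append, PySem.List.pyGetD_natCast,
    PySem.List.slice_to _ (Int.natCast_nonneg _), Int.toNat_natCast]


-- ===== VERDICT (by name: the statement is the Claim_ definition above) =====
theorem moveaxis_spec : Claim_equal_moveaxis := by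
  intro raw _hdom hpre
  unfold Spec_moveaxis
  symm
  obtain ⟨hne, hh, hrect⟩ := hpre
  have h0 : PySem.List.pyGetD raw 0 [] = raw.headD [] := by
    cases raw with
    | nil => rfl
    | cons a l => simp [pysem]
  have h00 : PySem.List.pyGetD (raw.headD []) 0 [] = (raw.headD []).headD [] := by
    cases raw.headD [] with
    | nil => rfl
    | cons a l => simp [pysem]
  rw [moveaxis_eq, moveaxis_alt_eq, h0, h00]
  apply List.map_congr_left
  intro s hs
  rw [List.mem_range] at hs
  have hnw : 0 < raw.length := List.length_pos_iff.mpr hne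
  have hrows : ∀ r ∈ (List.range raw.length).map (fun w =>
      ((raw.getD w []).getD s []).take ((raw.headD []).headD []).length),
      r.length = ((raw.headD []).headD []).length := by
    intro r hr
    obtain ⟨w, hw, rfl⟩ := List.mem_map.mp hr
    rw [List.mem_range] at hw
    have hmem : raw.getD w [] ∈ raw := by
      rw [List.getD_eq_getElem _ _ hw]; exact List.getElem_mem hw
    obtain ⟨hlen1, hlen2⟩ := hrect _ hmem
    have hsmem : (raw.getD w []).getD s [] ∈ (raw.getD w []).take (raw.headD []).length := by
      rw [List.getD_eq_getElem _ _ (lt_of_lt_of_le hs hlen1)]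
      exact List.mem_take_iff_getElem.mpr ⟨s, by omega, rfl⟩
    have hge := hlen2 _ hsmem
    rw [List.length_take]
    exact min_eq_left hge
  rw [pyZipStar_rect _ _ (by simp; omega) hrows]
  apply List.map_congr_left
  intro t ht
  rw [List.mem_range] at ht
  rw [List.map_map]
  apply List.map_congr_left
  intro w _
  simp only [Function.comp]
  simp only [List.headD_eq_head?_getD] at ht
  simp [List.getD_eq_getElem?_getD, ht]
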